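-- pv_equiv track=rewrite | github.com/cvdlab-alumni/439451 | 2014-05-16/python/exercise1.py | trasl_space
-- ===== SOURCE A (Python) =====
-- def trasl_space(q,lista,assi):
--     out = []
--     for k in range(len(lista)):
--         if (k) in assi:
--             out = out+[lista[k]+q]
--         else:
--             out = out + [lista[k]]
--     return out
-- ===== SOURCE B (Python) =====
-- def trasl_space(q, lista, assi):
--     idxs = sorted({i for i in assi if 0 <= i < len(lista)})
--     out = []
--     j = 0
--     for k, x in enumerate(lista):
--         if j < len(idxs) and idxs[j] == k:
--             out.append(x + q)
--             j += 1
--         else: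
--             out.append(x)
--     return out
-- ===== Notes on version B (the rewrite author's own statement) =====
-- stated objective: faster
-- what changed: B sorts the distinct in-range target indices once and then merges them against the list positions in a single two-pointer pass, instead of testing every position for membership in assi with a linear scan.
import Mathlib
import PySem

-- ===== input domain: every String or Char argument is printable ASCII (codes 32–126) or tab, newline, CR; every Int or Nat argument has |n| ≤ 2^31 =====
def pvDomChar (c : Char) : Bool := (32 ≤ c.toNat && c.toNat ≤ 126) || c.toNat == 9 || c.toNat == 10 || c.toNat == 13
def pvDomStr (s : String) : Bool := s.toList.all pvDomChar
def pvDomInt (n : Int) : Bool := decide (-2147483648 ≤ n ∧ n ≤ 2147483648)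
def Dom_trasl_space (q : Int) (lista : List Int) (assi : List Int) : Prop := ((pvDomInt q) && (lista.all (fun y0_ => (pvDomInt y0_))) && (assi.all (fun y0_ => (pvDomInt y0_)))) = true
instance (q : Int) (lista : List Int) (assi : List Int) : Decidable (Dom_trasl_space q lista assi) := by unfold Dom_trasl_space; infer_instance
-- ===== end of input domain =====

-- B sorts the distinct in-range target indices once and merges them against the positions in a
-- single two-pointer pass, replacing A's per-position linear membership scan (objective: faster).


-- ===== PORT A =====
-- out = []; for k in range(len(lista)): out = out + [lista[k]+q] if k in assi else out + [lista[k]]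
def trasl_space (q : Int) (lista : List Int) (assi : List Int) : List Int :=
  (List.range lista.length).foldl
    (fun (out : List Int) (k : Nat) =>
      if (k : Int) ∈ assi then out ++ [lista.getD k 0 + q]
      else out ++ [lista.getD k 0]) []

-- ===== PORT B =====
-- idxs = sorted({i for i in assi if 0 <= i < len(lista)})   (sorted of a set: order-independent)
def pvTargets (lista assi : List Int) : List Int :=
  PySem.List.sorted
    (PySem.Set.ofList (assi.filter (fun i => decide (0 ≤ i) && decide (i < (lista.length : Int)))))
    (fun x => x) false

-- the merge pass: k counts positions, the first list is the remaining suffix lista[k:],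
-- the third is the not-yet-consumed suffix idxs[j:] of the sorted index list
def pvMerge (q : Int) : List Int → Int → List Int → List Int
  | [], _, _ => []
  | x :: xs, k, i :: rest =>
      if i = k then (x + q) :: pvMerge q xs (k + 1) rest
      else x :: pvMerge q xs (k + 1) (i :: rest)
  | x :: xs, k, [] => x :: pvMerge q xs (k + 1) []

def trasl_space_alt (q : Int) (lista : List Int) (assi : List Int) : List Int :=
  pvMerge q lista 0 (pvTargets lista assi)

-- ===== PRECONDITION & SPEC =====
def Spec_trasl_space (q : Int) (lista : List Int) (assi : List Int) (out : List Int) : Prop := out = trasl_space_alt q lista assi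
instance (q : Int) (lista : List Int) (assi : List Int) (out : List Int) : Decidable (Spec_trasl_space q lista assi out) := by unfold Spec_trasl_space; infer_instance

-- ===== CLAIM (what is proved, stated in full; the proofs are below) =====
def Claim_equal_trasl_space : Prop := ∀ (q : Int) (lista : List Int) (assi : List Int), Dom_trasl_space q lista assi → Spec_trasl_space q lista assi (trasl_space q lista assi)

-- ===== LEMMAS AND PROOFS =====

-- A's loop appends one element per index: it is the map over range.
theorem trasl_space_eq_map (q : Int) (lista : List Int) (assi : List Int) :
    trasl_space q lista assi =
      (List.range lista.length).map
        (fun (k : Nat) => if (k : Int) ∈ assi then lista.getD k 0 + q else lista.getD k 0) := by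
  unfold trasl_space
  have h : (fun (out : List Int) (k : Nat) =>
      if (k : Int) ∈ assi then out ++ [lista.getD k 0 + q] else out ++ [lista.getD k 0])
      = fun (out : List Int) (k : Nat) =>
          out ++ [if (k : Int) ∈ assi then lista.getD k 0 + q else lista.getD k 0] := by
    funext out k; split <;> rfl
  rw [h, PySem.List.foldl_append_singleton_eq_map]
  simp

-- B's merge pass, characterised: on a strictly increasing index list all ≥ k it selects
-- exactly the positions in the list.
theorem pvMerge_eq_map (q : Int) :
    ∀ (xs : List Int) (k : Int) (idxs : List Int),
      idxs.Pairwise (· < ·) → (∀ i ∈ idxs, k ≤ i) →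
      pvMerge q xs k idxs =
        (List.range xs.length).map
          (fun (j : Nat) => if (k + (j : Int)) ∈ idxs then xs.getD j 0 + q else xs.getD j 0) := by
  intro xs
  induction xs with
  | nil => intro k idxs _ _; simp [pvMerge]
  | cons x t ih =>
    intro k idxs hpw hge
    cases idxs with
    | nil =>
      simp only [pvMerge]
      rw [ih (k + 1) [] (by simp) (by simp)]
      simp only [List.length_cons]
      rw [List.range_succ_eq_map]
      simp [List.map_map, Function.comp]
    | cons i rest =>
      rcases List.pairwise_cons.mp hpw with ⟨hlt, hpw'⟩
      by_cases hik : i = k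
      · subst hik
        simp only [pvMerge, ite_true]
        have hrest_ge : ∀ j ∈ rest, i + 1 ≤ j := fun j hj => (hlt j hj)
        rw [ih (i + 1) rest hpw' hrest_ge]
        simp only [List.length_cons]
        rw [List.range_succ_eq_map]
        simp only [List.map_cons, List.map_map]
        apply List.cons_eq_cons.mpr
        constructor
        · have h0 : (i + ((0 : Nat) : Int)) ∈ i :: rest := by simp
          rw [if_pos h0]; rfl
        · apply List.map_congr_left
          intro j _
          have hm : (i + ((j + 1 : Nat) : Int)) ∈ i :: rest ↔ (i + 1 + (j : Int)) ∈ rest := by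
            constructor
            · intro h
              rcases List.mem_cons.mp h with h | h
              · exfalso; omega
              · have : (i + ((j + 1 : Nat) : Int)) = i + 1 + (j : Int) := by push_cast; ring
                rwa [this] at h
            · intro h
              have : (i + ((j + 1 : Nat) : Int)) = i + 1 + (j : Int) := by push_cast; ring
              rw [this]; exact List.mem_cons_of_mem _ h
          simp only [Function.comp]
          rw [if_congr hm rfl rfl]; rfl
      · have hik' : k < i := lt_of_le_of_ne (hge i (by simp)) (Ne.symm hik)
        simp only [pvMerge, if_neg hik]
        have hge' : ∀ j ∈ i :: rest, k + 1 ≤ j := by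
          intro j hj
          rcases List.mem_cons.mp hj with h | h
          · omega
          · have := hlt j h; omega
        rw [ih (k + 1) (i :: rest) hpw hge']
        simp only [List.length_cons]
        rw [List.range_succ_eq_map]
        simp only [List.map_cons, List.map_map]
        apply List.cons_eq_cons.mpr
        constructor
        · have h0 : (k + ((0 : Nat) : Int)) ∉ i :: rest := by
            intro h
            rcases List.mem_cons.mp h with h | h
            · omega
            · have := hge' _ (List.mem_cons_of_mem _ h); simp at h
              have := hlt _ h; omega
          rw [if_neg h0]; rfl
        · apply List.map_congr_left
          intro j _
          have : (k + ((j + 1 : Nat) : Int)) = k + 1 + (j : Int) := by push_cast; ring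
          simp only [Function.comp, this]
          split <;> rfl

theorem mem_pvTargets (lista assi : List Int) (v : Int) :
    v ∈ pvTargets lista assi ↔ v ∈ assi ∧ 0 ≤ v ∧ v < (lista.length : Int) := by
  unfold pvTargets
  rw [PySem.List.mem_sorted, PySem.Set.mem_ofList, List.mem_filter]
  simp

theorem trasl_space_eq_alt (q : Int) (lista : List Int) (assi : List Int) :
    trasl_space q lista assi = trasl_space_alt q lista assi := by
  rw [trasl_space_eq_map]
  unfold trasl_space_alt
  rw [pvMerge_eq_map q lista 0 (pvTargets lista assi)
    (PySem.List.sorted_ofList_pairwise_lt _)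
    (fun i hi => ((mem_pvTargets lista assi i).mp hi).2.1)]
  apply List.map_congr_left
  intro j hj
  have hjlen : j < lista.length := List.mem_range.mp hj
  have hmem : (0 + (j : Int)) ∈ pvTargets lista assi ↔ (j : Int) ∈ assi := by
    rw [zero_add, mem_pvTargets]
    constructor
    · exact fun h => h.1
    · intro h; exact ⟨h, by positivity, by exact_mod_cast hjlen⟩
  rw [if_congr hmem rfl rfl]

-- ===== VERDICT (by name: the statement is the Claim_ definition above) =====
theorem trasl_space_spec : Claim_equal_trasl_space := by
  intro q lista assi _
  exact trasl_space_eq_alt q lista assi
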